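-- pv_equiv track=rewrite | github.com/angelajmzhou/UVA-Judge | nine.py | ninetest
-- ===== SOURCE A (Python) =====
-- def ninetest(num):
--     n=num
--     sum=0
--     while(n>0):
--              sum+=n%10
--              n//=10
--     if sum==9:
--             return 1
--     elif sum>0 and sum % 9 == 0:
--             return 1+ninetest(sum)
--     return 0
-- ===== SOURCE B (Python) =====
-- def _digitsum(n):
--     return 0 if n == 0 else n % 10 + _digitsum(n // 10)
--
-- def ninetest(num):
--     # answer is 0 unless num is a positive multiple of 9 (digit sum is congruent
--     # to num mod 9); otherwise it is the number of digit-sum applications needed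
--     # to reach the single digit 9, at least 1.
--     if num <= 0 or num % 9 != 0:
--         return 0
--     count = 0
--     while num > 9:
--         num = _digitsum(num)
--         count += 1
--     return max(count, 1)
-- ===== Notes on version B (the rewrite author's own statement) =====
-- stated objective: alternative
-- what changed: Instead of computing the digit sum first and recursing on it, B tests divisibility by 9 up front (digit sum is congruent to num mod 9), then counts digit-sum applications in a persistence-style loop running until the value is a single digit, returning max(count,1).
import Mathlib
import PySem

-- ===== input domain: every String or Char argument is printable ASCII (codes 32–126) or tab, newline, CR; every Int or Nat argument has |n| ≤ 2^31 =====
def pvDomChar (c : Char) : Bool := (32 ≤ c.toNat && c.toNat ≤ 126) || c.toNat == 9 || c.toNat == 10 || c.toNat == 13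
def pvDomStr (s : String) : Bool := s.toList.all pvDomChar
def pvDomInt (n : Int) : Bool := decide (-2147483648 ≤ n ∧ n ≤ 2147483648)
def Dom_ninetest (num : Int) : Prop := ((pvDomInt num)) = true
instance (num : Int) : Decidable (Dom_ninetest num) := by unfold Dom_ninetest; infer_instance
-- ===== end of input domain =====

-- B tests divisibility by 9 up front and counts digit-sum applications in a persistence-style
-- loop (digit sum computed by a recursive helper) instead of A's digit-sum-first recursion;
-- the return values are proved equal for every Int. (Fuel arguments only make the loops total;
-- they are always sufficient, as the proofs below show.)

-- ===== PORT A =====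
-- A's inner digit-sum while-loop: while n>0: sum += n%10; n //= 10  (fuel n.toNat suffices)
def pvDigitsA : Nat → Int → Int → Int
  | 0, _, s => s
  | fuel + 1, n, s =>
    if n > 0 then pvDigitsA fuel (PySem.Int.floordiv n 10) (s + PySem.Int.mod n 10) else s

-- A's recursion on the digit sum, branch for branch
def pvNineA : Nat → Int → Int
  | 0, _ => 0
  | fuel + 1, num =>
    let sum := pvDigitsA num.toNat num 0
    if sum = 9 then 1
    else if 0 < sum ∧ PySem.Int.mod sum 9 = 0 then 1 + pvNineA fuel sum
    else 0

def ninetest (num : Int) : Int := pvNineA (num.toNat + 1) num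

-- ===== PORT B =====
-- Source B's recursive helper _digitsum: 0 if n == 0 else n % 10 + _digitsum(n // 10)
def pvDS : Nat → Int → Int
  | 0, _ => 0
  | fuel + 1, n =>
    if n = 0 then 0 else PySem.Int.mod n 10 + pvDS fuel (PySem.Int.floordiv n 10)

-- Source B's while-loop: while num > 9: num = _digitsum(num); count += 1
def pvPersist : Nat → Int → Int → Int
  | 0, _, count => count
  | fuel + 1, n, count =>
    if n > 9 then pvPersist fuel (pvDS (n.toNat + 1) n) (count + 1) else count

def ninetest_alt (num : Int) : Int :=
  if num ≤ 0 ∨ PySem.Int.mod num 9 ≠ 0 then 0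
  else max (pvPersist (num.toNat + 1) num 0) 1

-- ===== PRECONDITION & SPEC =====
def Spec_ninetest (num : Int) (out : Int) : Prop := out = ninetest_alt num
instance (num : Int) (out : Int) : Decidable (Spec_ninetest num out) := by unfold Spec_ninetest; infer_instance

-- ===== CLAIM (what is proved, stated in full; the proofs are below) =====
def Claim_equal_ninetest : Prop := ∀ (num : Int), Dom_ninetest num → Spec_ninetest num (ninetest num)

-- ===== LEMMAS AND PROOFS =====
theorem pvDigitsA_nonpos (fuel : Nat) (n s : Int) (hn : ¬ n > 0) :
    pvDigitsA fuel n s = s := by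
  cases fuel with
  | zero => rfl
  | succ k => simp [pvDigitsA, hn]

theorem pvDigitsA_shift (fuel : Nat) (n s : Int) :
    pvDigitsA fuel n s = s + pvDigitsA fuel n 0 := by
  induction fuel generalizing n s with
  | zero => simp [pvDigitsA]
  | succ k ih =>
    by_cases hn : n > 0
    · simp only [pvDigitsA, hn, if_pos]
      rw [ih]
      conv_rhs => rw [ih]
      ring
    · simp [pvDigitsA, hn]

theorem pvDigitsA_step (k : Nat) (n s : Int) (hn : 0 < n) :
    pvDigitsA (k + 1) n s = (s + n % 10) + pvDigitsA k (n / 10) 0 := by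
  show (if n > 0 then pvDigitsA k (PySem.Int.floordiv n 10) (s + PySem.Int.mod n 10) else s) = _
  rw [if_pos hn, PySem.Int.floordiv_eq_ediv_of_pos (by norm_num),
      PySem.Int.mod_eq_emod_of_pos (by norm_num), pvDigitsA_shift]

theorem pvDigitsA_fuel (f : Nat) : ∀ (g : Nat) (n s : Int), n.toNat ≤ f → n.toNat ≤ g →
    pvDigitsA f n s = pvDigitsA g n s := by
  induction f with
  | zero =>
    intro g n s hf _
    have hn : ¬ n > 0 := by omega
    rw [pvDigitsA_nonpos 0 n s hn, pvDigitsA_nonpos g n s hn]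
  | succ k ih =>
    intro g n s hf hg
    by_cases hn : n > 0
    · cases g with
      | zero => omega
      | succ g' =>
        simp only [pvDigitsA, hn, if_pos]
        rw [PySem.Int.floordiv_eq_ediv_of_pos (by norm_num)]
        exact ih g' (n / 10) _ (by omega) (by omega)
    · rw [pvDigitsA_nonpos _ n s hn, pvDigitsA_nonpos g n s hn]

theorem pvDigitsA_pos (fuel : Nat) : ∀ (n : Int), 0 < n → n.toNat ≤ fuel →
    0 < pvDigitsA fuel n 0 := by
  induction fuel with
  | zero => intro n hn hf; omega
  | succ k ih =>
    intro n hn hf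
    simp only [pvDigitsA, hn, if_pos]
    rw [pvDigitsA_shift, PySem.Int.floordiv_eq_ediv_of_pos (by norm_num),
        PySem.Int.mod_eq_emod_of_pos (by norm_num)]
    by_cases h10 : 10 ≤ n
    · have := ih (n / 10) (by omega) (by omega)
      omega
    · have hq : n / 10 = 0 := by omega
      rw [hq, pvDigitsA_nonpos k 0 _ (by norm_num)]
      omega

theorem pvDigitsA_le (fuel : Nat) (n : Int) (hf : n.toNat ≤ fuel) (hn : 0 < n) :
    pvDigitsA fuel n 0 ≤ n ∧ (10 ≤ n → pvDigitsA fuel n 0 < n) := by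
  induction fuel generalizing n with
  | zero => omega
  | succ k ih =>
    simp only [pvDigitsA, hn, if_pos]
    have hd := PySem.Int.floordiv_eq_ediv_of_pos (a := n) (b := 10) (by norm_num)
    have hm := PySem.Int.mod_eq_emod_of_pos (a := n) (b := 10) (by norm_num)
    rw [pvDigitsA_shift, hd, hm]
    by_cases h10 : 10 ≤ n
    · have hq : 0 < n / 10 := by omega
      have := ih (n / 10) (by omega) hq
      omega
    · have hq : n / 10 = 0 := by omega
      rw [hq, pvDigitsA_nonpos k 0 _ (by norm_num)]
      omega

theorem pvDigitsA_single (fuel : Nat) (n : Int) (h1 : 0 < n) (h2 : n < 10)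
    (hf : n.toNat ≤ fuel) : pvDigitsA fuel n 0 = n := by
  cases fuel with
  | zero => omega
  | succ k =>
    simp only [pvDigitsA, h1, if_pos]
    rw [PySem.Int.floordiv_eq_ediv_of_pos (by norm_num),
        PySem.Int.mod_eq_emod_of_pos (by norm_num)]
    have hq : n / 10 = 0 := by omega
    rw [hq, pvDigitsA_nonpos k 0 _ (by norm_num)]
    omega

-- the digit sum is congruent to n modulo 9
theorem pvDigitsA_mod9 (fuel : Nat) : ∀ (n : Int), 0 ≤ n → n.toNat ≤ fuel →
    pvDigitsA fuel n 0 % 9 = n % 9 := by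
  induction fuel with
  | zero => intro n h0 hf; have : n = 0 := by omega
            subst this; rfl
  | succ k ih =>
    intro n h0 hf
    by_cases hn : n > 0
    · rw [pvDigitsA_step k n 0 hn]
      have hih := ih (n / 10) (by omega) (by omega)
      omega
    · rw [pvDigitsA_nonpos _ n 0 hn]
      omega

-- the digit sum of the next iterate strictly decreases (the fuel budgets are sufficient)
theorem pvDigits_decr (num : Int) (h9 : ¬ pvDigitsA num.toNat num 0 = 9)
    (hpos : 0 < pvDigitsA num.toNat num 0)
    (hmod : pvDigitsA num.toNat num 0 % 9 = 0) :
    (pvDigitsA num.toNat num 0).toNat < num.toNat := by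
  have hn : 0 < num := by
    by_contra hc
    rw [pvDigitsA_nonpos num.toNat num 0 (by omega)] at hpos
    omega
  have hle := pvDigitsA_le num.toNat num (le_refl _) hn
  by_cases h10 : 10 ≤ num
  · have := hle.2 h10; omega
  · have hnum : pvDigitsA num.toNat num 0 = num :=
      pvDigitsA_single num.toNat num hn (by omega) (le_refl _)
    rw [hnum] at hmod h9 hpos
    omega

-- Source B's _digitsum computes the same digit sum as A's while-loop
theorem pvDS_eq (f : Nat) : ∀ (n : Int), 0 ≤ n → n.toNat ≤ f →
    pvDS (f + 1) n = pvDigitsA (f + 1) n 0 := by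
  induction f with
  | zero =>
    intro n h0 hf
    have : n = 0 := by omega
    subst this; rfl
  | succ k ih =>
    intro n h0 hf
    by_cases hn : n = 0
    · subst hn; rfl
    · have hpos : n > 0 := by omega
      show (if n = 0 then 0 else PySem.Int.mod n 10 + pvDS (k + 1) (PySem.Int.floordiv n 10))
            = pvDigitsA (k + 2) n 0
      rw [if_neg hn, PySem.Int.floordiv_eq_ediv_of_pos (by norm_num),
          PySem.Int.mod_eq_emod_of_pos (by norm_num), pvDigitsA_step (k + 1) n 0 hpos,
          ih (n / 10) (by omega) (by omega)]
      omega

theorem pvPersist_le9 (fuel : Nat) (n c : Int) (h : ¬ n > 9) : pvPersist fuel n c = c := by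
  cases fuel with
  | zero => rfl
  | succ k => simp [pvPersist, h]

theorem pvPersist_shift (fuel : Nat) : ∀ (n c : Int), pvPersist fuel n c = c + pvPersist fuel n 0 := by
  induction fuel with
  | zero => intro n c; simp [pvPersist]
  | succ k ih =>
    intro n c
    by_cases hn : n > 9
    · simp only [pvPersist, hn, if_pos]
      rw [ih _ (c + 1), ih _ (0 + 1)]
      ring
    · simp [pvPersist, hn]

theorem pvPersist_nonneg (fuel : Nat) : ∀ (n c : Int), 0 ≤ c → 0 ≤ pvPersist fuel n c := by
  induction fuel with
  | zero => intro n c hc; exact hc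
  | succ k ih =>
    intro n c hc
    by_cases hn : n > 9
    · simp only [pvPersist, hn, if_pos]
      exact ih _ _ (by omega)
    · simpa [pvPersist, hn] using hc

theorem pvPersist_pos (fuel : Nat) (n : Int) (hf : 0 < fuel) (hn : 9 < n) :
    1 ≤ pvPersist fuel n 0 := by
  cases fuel with
  | zero => omega
  | succ k =>
    simp only [pvPersist, hn, if_pos]
    rw [pvPersist_shift]
    have := pvPersist_nonneg k (pvDS (n.toNat + 1) n) 0 (le_refl 0)
    omega

-- main correspondence: A's recursion equals B's counted loop, given sufficient fuels
theorem pvKey (k : Nat) : ∀ (n : Int) (f g : Nat), 0 < n → n % 9 = 0 → n.toNat ≤ k →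
    n.toNat < f → n.toNat < g → pvNineA f n = max (pvPersist g n 0) 1 := by
  induction k with
  | zero => intro n f g hn _ hk _ _; omega
  | succ k ih =>
    intro n f g hn hmod hk hf hg
    obtain ⟨f', rfl⟩ : ∃ f', f = f' + 1 := ⟨f - 1, by omega⟩
    obtain ⟨g', rfl⟩ : ∃ g', g = g' + 1 := ⟨g - 1, by omega⟩
    have hSpos : 0 < pvDigitsA n.toNat n 0 := pvDigitsA_pos n.toNat n hn (le_refl _)
    have hSmod : pvDigitsA n.toNat n 0 % 9 = 0 := by
      rw [pvDigitsA_mod9 n.toNat n (by omega) (le_refl _)]; exact hmod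
    have hDS : pvDS (n.toNat + 1) n = pvDigitsA n.toNat n 0 := by
      rw [pvDS_eq n.toNat n (by omega) (le_refl _)]
      exact pvDigitsA_fuel (n.toNat + 1) n.toNat n 0 (by omega) (le_refl _)
    have hm9 : PySem.Int.mod (pvDigitsA n.toNat n 0) 9 = pvDigitsA n.toNat n 0 % 9 :=
      PySem.Int.mod_eq_emod_of_pos (by norm_num)
    simp only [pvNineA, pvPersist, hDS]
    by_cases h9 : pvDigitsA n.toNat n 0 = 9
    · rw [if_pos h9]
      by_cases hn9 : n > 9
      · rw [if_pos hn9, h9, pvPersist_le9 g' 9 (0 + 1) (by norm_num)]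
        omega
      · rw [if_neg hn9]
        omega
    · have hS18 : 18 ≤ pvDigitsA n.toNat n 0 := by omega
      have hn9 : n > 9 := by
        by_contra hc
        have : n = 9 := by omega
        rw [this] at h9
        exact h9 (pvDigitsA_single (9 : Int).toNat 9 (by norm_num) (by norm_num) (le_refl _))
      rw [if_neg h9, if_pos ⟨hSpos, by omega⟩, if_pos hn9, pvPersist_shift]
      have hlt := pvDigits_decr n h9 hSpos hSmod
      have hih := ih (pvDigitsA n.toNat n 0) f' g' hSpos hSmod (by omega) (by omega) (by omega)
      have hP := pvPersist_pos g' (pvDigitsA n.toNat n 0) (by omega) (by omega)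
      rw [hih]
      omega

-- ===== VERDICT (by name: the statement is the Claim_ definition above) =====
theorem ninetest_spec : Claim_equal_ninetest := by
  intro num _
  unfold Spec_ninetest ninetest ninetest_alt
  by_cases h0 : num ≤ 0
  · have ht : num.toNat = 0 := by omega
    rw [if_pos (Or.inl h0), ht]
    show pvNineA 1 num = 0
    simp only [pvNineA, ht]
    rw [pvDigitsA_nonpos 0 num 0 (by omega)]
    norm_num
  · have hpos : 0 < num := by omega
    have hm : PySem.Int.mod num 9 = num % 9 := PySem.Int.mod_eq_emod_of_pos (by norm_num)
    by_cases hmod : num % 9 = 0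
    · rw [if_neg (by rw [hm]; omega)]
      exact pvKey num.toNat num (num.toNat + 1) (num.toNat + 1) hpos hmod (le_refl _)
        (by omega) (by omega)
    · rw [if_pos (Or.inr (by rw [hm]; exact hmod))]
      show pvNineA (num.toNat + 1) num = 0
      have hSmod : pvDigitsA num.toNat num 0 % 9 = num % 9 :=
        pvDigitsA_mod9 num.toNat num (by omega) (le_refl _)
      have hm9 : PySem.Int.mod (pvDigitsA num.toNat num 0) 9 = pvDigitsA num.toNat num 0 % 9 :=
        PySem.Int.mod_eq_emod_of_pos (by norm_num)
      simp only [pvNineA]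
      rw [if_neg (by omega), if_neg (by rw [hm9]; omega)]
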